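-- pv_equiv track=rewrite | github.com/hamster624/break-eternity.py | break_eternity.py | get_short_scale_suffix
-- ===== SOURCE A (Python) =====
-- FirstOnes = ["", "U", "D", "T", "Qd", "Qn", "Sx", "Sp", "Oc", "No"]
--
-- SecondOnes = ["", "De", "Vt", "Tg", "qg", "Qg", "sg", "Sg", "Og", "Ng"]
--
-- ThirdOnes = ["", "Ce", "Du", "Tr", "Qa", "Qi", "Se", "Si", "Ot", "Ni"]
--
-- MultOnes = [
--     "", "Mi", "Mc", "Na", "Pi", "Fm", "At", "Zp", "Yc", "Xo", "Ve", "Me", "Due",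
--     "Tre", "Te", "Pt", "He", "Hp", "Oct", "En", "Ic", "Mei", "Dui", "Tri", "Teti",
--     "Pti", "Hei", "Hp", "Oci", "Eni", "Tra", "TeC", "MTc", "DTc", "TrTc", "TeTc",
--     "PeTc", "HTc", "HpT", "OcT", "EnT", "TetC", "MTetc", "DTetc", "TrTetc", "TeTetc",
--     "PeTetc", "HTetc", "HpTetc", "OcTetc", "EnTetc", "PcT", "MPcT", "DPcT", "TPCt",
--     "TePCt", "PePCt", "HePCt", "HpPct", "OcPct", "EnPct", "HCt", "MHcT", "DHcT",
--     "THCt", "TeHCt", "PeHCt", "HeHCt", "HpHct", "OcHct", "EnHct", "HpCt", "MHpcT",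
--     "DHpcT", "THpCt", "TeHpCt", "PeHpCt", "HeHpCt", "HpHpct", "OcHpct", "EnHpct",
--     "OCt", "MOcT", "DOcT", "TOCt", "TeOCt", "PeOCt", "HeOCt", "HpOct", "OcOct",
--     "EnOct", "Ent", "MEnT", "DEnT", "TEnt", "TeEnt", "PeEnt", "HeEnt", "HpEnt",
--     "OcEnt", "EnEnt", "Hect", "MeHect"
-- ]
--
-- def get_short_scale_suffix(n: int) -> str:
--     if n == 0:
--         return ""
--     if n < 1000:
--         hundreds = n // 100
--         tens = (n % 100) // 10
--         units = n % 10
--         return FirstOnes[units] + SecondOnes[tens] + ThirdOnes[hundreds]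
--
--     for i in range(len(MultOnes)-1, 0, -1):
--         magnitude = 1000 ** i
--         if n < magnitude:
--             continue
--         count = n // magnitude
--         remainder = n % magnitude
--         if count == 1:
--             count_str = ""
--         else:
--             count_str = get_short_scale_suffix(count)
--
--         rem_str = get_short_scale_suffix(remainder) if remainder > 0 else ""
--         return count_str + MultOnes[i] + rem_str
--
--     return ""
-- ===== SOURCE B (Python) =====
-- FirstOnes = ["", "U", "D", "T", "Qd", "Qn", "Sx", "Sp", "Oc", "No"]
--
-- SecondOnes = ["", "De", "Vt", "Tg", "qg", "Qg", "sg", "Sg", "Og", "Ng"]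
--
-- ThirdOnes = ["", "Ce", "Du", "Tr", "Qa", "Qi", "Se", "Si", "Ot", "Ni"]
--
-- MultOnes = [
--     "", "Mi", "Mc", "Na", "Pi", "Fm", "At", "Zp", "Yc", "Xo", "Ve", "Me", "Due",
--     "Tre", "Te", "Pt", "He", "Hp", "Oct", "En", "Ic", "Mei", "Dui", "Tri", "Teti",
--     "Pti", "Hei", "Hp", "Oci", "Eni", "Tra", "TeC", "MTc", "DTc", "TrTc", "TeTc",
--     "PeTc", "HTc", "HpT", "OcT", "EnT", "TetC", "MTetc", "DTetc", "TrTetc", "TeTetc",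
--     "PeTetc", "HTetc", "HpTetc", "OcTetc", "EnTetc", "PcT", "MPcT", "DPcT", "TPCt",
--     "TePCt", "PePCt", "HePCt", "HpPct", "OcPct", "EnPct", "HCt", "MHcT", "DHcT",
--     "THCt", "TeHCt", "PeHCt", "HeHCt", "HpHct", "OcHct", "EnHct", "HpCt", "MHpcT",
--     "DHpcT", "THpCt", "TeHpCt", "PeHpCt", "HeHpCt", "HpHpct", "OcHpct", "EnHpct",
--     "OCt", "MOcT", "DOcT", "TOCt", "TeOCt", "PeOCt", "HeOCt", "HpOct", "OcOct",
--     "EnOct", "Ent", "MEnT", "DEnT", "TEnt", "TeEnt", "PeEnt", "HeEnt", "HpEnt",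
--     "OcEnt", "EnEnt", "Hect", "MeHect"
-- ]
--
-- def _group_name(g: int) -> str:
--     return FirstOnes[g % 10] + SecondOnes[(g // 10) % 10] + ThirdOnes[g // 100]
--
-- def get_short_scale_suffix(n: int) -> str:
--     if n <= 0:
--         return ""
--     parts = []
--     j = 0
--     while n > 0:
--         g = n % 1000
--         if g > 0:
--             if j == 0:
--                 parts.append(_group_name(g))
--             elif g == 1:
--                 parts.append(MultOnes[j])
--             else:
--                 parts.append(_group_name(g) + MultOnes[j])
--         n //= 1000
--         j += 1
--     return "".join(reversed(parts))
-- ===== Notes on version B (the rewrite author's own statement) =====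
-- stated objective: simpler
-- what changed: Replaced A's recursive descent, which rescans all ~100 powers 1000**i from the top on every (recursive) call, by a single iterative least-significant-first base-1000 digit pass that renders each nonzero group once and joins the parts most-significant-first.
-- outside the precondition, e.g. on get_short_scale_suffix(-5): A returns 'QnNgNi', B returns ''; on get_short_scale_suffix(-1): A returns 'NoNgNi', B returns ''; on get_short_scale_suffix(-1001): A raises IndexError, B returns ''
import Mathlib
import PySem

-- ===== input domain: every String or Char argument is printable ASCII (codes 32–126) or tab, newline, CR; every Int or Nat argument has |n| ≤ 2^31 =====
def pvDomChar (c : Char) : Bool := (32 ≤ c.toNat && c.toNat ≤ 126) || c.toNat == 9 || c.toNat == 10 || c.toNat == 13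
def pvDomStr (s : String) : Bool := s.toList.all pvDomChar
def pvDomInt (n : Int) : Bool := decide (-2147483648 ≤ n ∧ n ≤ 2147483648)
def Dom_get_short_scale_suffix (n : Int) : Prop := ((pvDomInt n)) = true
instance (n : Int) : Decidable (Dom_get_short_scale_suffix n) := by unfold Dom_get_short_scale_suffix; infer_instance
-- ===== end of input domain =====

-- B replaces A's recursive search for the largest power of 1000 (rescanning ~100 exponents
-- per recursive call) by a single least-significant-first base-1000 digit pass: a simpler,
-- non-recursive rendering of the same suffix.

-- ===== PORT A =====
def FirstOnes : List String := ["", "U", "D", "T", "Qd", "Qn", "Sx", "Sp", "Oc", "No"]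

def SecondOnes : List String := ["", "De", "Vt", "Tg", "qg", "Qg", "sg", "Sg", "Og", "Ng"]

def ThirdOnes : List String := ["", "Ce", "Du", "Tr", "Qa", "Qi", "Se", "Si", "Ot", "Ni"]

def MultOnes : List String := [
    "", "Mi", "Mc", "Na", "Pi", "Fm", "At", "Zp", "Yc", "Xo", "Ve", "Me", "Due",
    "Tre", "Te", "Pt", "He", "Hp", "Oct", "En", "Ic", "Mei", "Dui", "Tri", "Teti",
    "Pti", "Hei", "Hp", "Oci", "Eni", "Tra", "TeC", "MTc", "DTc", "TrTc", "TeTc",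
    "PeTc", "HTc", "HpT", "OcT", "EnT", "TetC", "MTetc", "DTetc", "TrTetc", "TeTetc",
    "PeTetc", "HTetc", "HpTetc", "OcTetc", "EnTetc", "PcT", "MPcT", "DPcT", "TPCt",
    "TePCt", "PePCt", "HePCt", "HpPct", "OcPct", "EnPct", "HCt", "MHcT", "DHcT",
    "THCt", "TeHCt", "PeHCt", "HeHCt", "HpHct", "OcHct", "EnHct", "HpCt", "MHpcT",
    "DHpcT", "THpCt", "TeHpCt", "PeHpCt", "HeHpCt", "HpHpct", "OcHpct", "EnHpct",
    "OCt", "MOcT", "DOcT", "TOCt", "TeOCt", "PeOCt", "HeOCt", "HpOct", "OcOct",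
    "EnOct", "Ent", "MEnT", "DEnT", "TEnt", "TeEnt", "PeEnt", "HeEnt", "HpEnt",
    "OcEnt", "EnEnt", "Hect", "MeHect"]

-- A's recursion is on smaller and smaller integer values; a fuel argument (n.toNat + 1 at the
-- top, enough since every recursive call is on a strictly smaller nonnegative value) makes the
-- same computation total.  Python indexing FirstOnes[...] etc. is pyGet?; the .getD "" default
-- is only ever read outside Pre_ (in range there).
mutual
def gsssA (fuel : Nat) (n : Int) : String :=
  match fuel with
  | 0 => ""
  | fuel' + 1 =>
    if n = 0 then ""
    else if n < 1000 then
      let hundreds := PySem.Int.floordiv n 100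
      let tens := PySem.Int.floordiv (PySem.Int.mod n 100) 10
      let units := PySem.Int.mod n 10
      (PySem.List.pyGet? FirstOnes units).getD "" ++
      (PySem.List.pyGet? SecondOnes tens).getD "" ++
      (PySem.List.pyGet? ThirdOnes hundreds).getD ""
    else gsssALoop fuel' n (PySem.List.pyRange 103 0 (-1))
  termination_by (fuel, 0)

-- the body of A's 'for i in range(len(MultOnes)-1, 0, -1)' loop (early return = stop)
def gsssALoop (fuel : Nat) (n : Int) (is : List Int) : String :=
  match is with
  | [] => ""
  | i :: rest =>
    let magnitude : Int := 1000 ^ i.toNat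
    if n < magnitude then gsssALoop fuel n rest
    else
      let count := PySem.Int.floordiv n magnitude
      let remainder := PySem.Int.mod n magnitude
      let count_str := if count = 1 then "" else gsssA fuel count
      let rem_str := if remainder > 0 then gsssA fuel remainder else ""
      count_str ++ (PySem.List.pyGet? MultOnes i).getD "" ++ rem_str
  termination_by (fuel, is.length + 1)
end

def get_short_scale_suffix (n : Int) : String := gsssA (n.toNat + 1) n

-- ===== PORT B =====
def pvGroupName (g : Int) : String :=
  (PySem.List.pyGet? FirstOnes (PySem.Int.mod g 10)).getD "" ++
  (PySem.List.pyGet? SecondOnes (PySem.Int.mod (PySem.Int.floordiv g 10) 10)).getD "" ++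
  (PySem.List.pyGet? ThirdOnes (PySem.Int.floordiv g 100)).getD ""

-- Source B's while loop: the parts list, least-significant group first (j = group index)
def pvParts (n : Int) (j : Int) : List String :=
  if n ≤ 0 then []
  else
    let g := PySem.Int.mod n 1000
    (if g > 0 then
       [if j = 0 then pvGroupName g
        else if g = 1 then (PySem.List.pyGet? MultOnes j).getD ""
        else pvGroupName g ++ (PySem.List.pyGet? MultOnes j).getD ""]
     else []) ++ pvParts (PySem.Int.floordiv n 1000) (j + 1)
  termination_by n.toNat
  decreasing_by
    rw [PySem.Int.floordiv_eq_ediv_of_pos (by norm_num : (0:Int) < 1000)]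
    omega

def get_short_scale_suffix_alt (n : Int) : String :=
  if n ≤ 0 then "" else PySem.Str.join "" (pvParts n 0).reverse

-- ===== PRECONDITION & SPEC =====
-- Pre_ restricts to the function's natural domain n ≥ 0: on -1000 ≤ n ≤ -1 A's value is an
-- accident of Python negative-index wraparound (e.g. A(-5) = 'QnNgNi'), and for n ≤ -1001 A
-- raises IndexError; B naturally returns "" for every n ≤ 0.
def Pre_get_short_scale_suffix (n : Int) : Prop := 0 ≤ n
instance (n : Int) : Decidable (Pre_get_short_scale_suffix n) := by unfold Pre_get_short_scale_suffix; infer_instance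

def pvWitness_get_short_scale_suffix : Int := 1234567

def Spec_get_short_scale_suffix (n : Int) (out : String) : Prop := out = get_short_scale_suffix_alt n
instance (n : Int) (out : String) : Decidable (Spec_get_short_scale_suffix n out) := by unfold Spec_get_short_scale_suffix; infer_instance

-- ===== CLAIM (what is proved, stated in full; the proofs are below) =====
def Claim_equal_get_short_scale_suffix : Prop := ∀ (n : Int), Dom_get_short_scale_suffix n → Pre_get_short_scale_suffix n → Spec_get_short_scale_suffix n (get_short_scale_suffix n)

-- ===== LEMMAS AND PROOFS =====

-- — string-join plumbing —
lemma strJoin_nil : PySem.Str.join "" ([] : List String) = "" := rfl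

lemma strJoin_cons (x : String) (l : List String) :
    PySem.Str.join "" (x :: l) = x ++ PySem.Str.join "" l := by
  cases l with
  | nil =>
    simp [PySem.Str.join, PySem.Chars.join, List.intercalate, String.ofList_toList,
      String.append_empty]
  | cons y t =>
    simp [PySem.Str.join, PySem.Chars.join, List.intercalate, String.ofList_append]

-- — B-side structure —
lemma pvParts_zero (j : Int) : pvParts 0 j = [] := by
  rw [pvParts]; simp

lemma pvParts_unfold (n j : Int) (h : 0 ≤ n) :
    pvParts n j =
      (if PySem.Int.mod n 1000 > 0 then
        [if j = 0 then pvGroupName (PySem.Int.mod n 1000)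
         else if PySem.Int.mod n 1000 = 1 then (PySem.List.pyGet? MultOnes j).getD ""
         else pvGroupName (PySem.Int.mod n 1000) ++ (PySem.List.pyGet? MultOnes j).getD ""]
       else []) ++ pvParts (PySem.Int.floordiv n 1000) (j + 1) := by
  rcases lt_or_eq_of_le h with hpos | hzero
  · rw [pvParts]; simp [not_le.mpr hpos]
  · subst hzero
    rw [pvParts_zero]
    have hm : PySem.Int.mod 0 1000 = 0 := by
      rw [PySem.Int.mod_eq_emod_of_pos (by norm_num)]; omega
    have hd : PySem.Int.floordiv 0 1000 = 0 := by
      rw [PySem.Int.floordiv_eq_ediv_of_pos (by norm_num)]; omega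
    rw [hm, hd, pvParts_zero]; simp

-- the one-group case: a single nonzero group g at position j ≥ 1
lemma pvParts_top (g j : Int) (h1 : 1 ≤ g) (h2 : g < 1000) (hj : j ≠ 0) :
    pvParts g j = [if g = 1 then (PySem.List.pyGet? MultOnes j).getD ""
                   else pvGroupName g ++ (PySem.List.pyGet? MultOnes j).getD ""] := by
  have hm : PySem.Int.mod g 1000 = g := by
    rw [PySem.Int.mod_eq_emod_of_pos (by norm_num)]; omega
  have hd : PySem.Int.floordiv g 1000 = 0 := by
    rw [PySem.Int.floordiv_eq_ediv_of_pos (by norm_num)]; omega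
  rw [pvParts_unfold g j (by omega), hm, hd, pvParts_zero]
  have hg : g > 0 := by omega
  simp [hj, hg]

-- the small case: B on 1 ≤ m < 1000 renders the single group
lemma alt_small (m : Int) (h1 : 1 ≤ m) (h2 : m < 1000) :
    get_short_scale_suffix_alt m = pvGroupName m := by
  have hm : PySem.Int.mod m 1000 = m := by
    rw [PySem.Int.mod_eq_emod_of_pos (by norm_num)]; omega
  have hd : PySem.Int.floordiv m 1000 = 0 := by
    rw [PySem.Int.floordiv_eq_ediv_of_pos (by norm_num)]; omega
  unfold get_short_scale_suffix_alt
  rw [if_neg (by omega), pvParts_unfold m 0 (by omega), hm, hd, pvParts_zero]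
  have hg : m > 0 := by omega
  simp [hg, strJoin_cons, strJoin_nil, String.append_empty]

-- join of B's reversed parts list is B itself (also when the remainder is 0)
lemma alt_eq_join (r : Int) (h : 0 ≤ r) :
    PySem.Str.join "" (pvParts r 0).reverse = get_short_scale_suffix_alt r := by
  rcases lt_or_eq_of_le h with hpos | hzero
  · unfold get_short_scale_suffix_alt; rw [if_neg (by omega)]
  · subst hzero; rw [pvParts_zero]; simp [get_short_scale_suffix_alt, strJoin_nil]

-- — A-side loop structure —
-- the countdown list [m, m-1, ..., 1]
def pvDown : Nat → List Int
  | 0 => []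
  | m + 1 => ((m : Int) + 1) :: pvDown m

lemma pyRange_down (m : Nat) : PySem.List.pyRange (m : Int) 0 (-1) = pvDown m := by
  induction m with
  | zero => simp [PySem.List.pyRange_neg_one_eq_nil, pvDown]
  | succ k ih =>
    rw [show ((k + 1 : Nat) : Int) = (k : Int) + 1 by push_cast; ring] at *
    rw [PySem.List.pyRange_neg_one_cons (by positivity), pvDown]
    simp [ih]

lemma loop_skip (f : Nat) (n : Int) (k : Nat) (hk : n < 1000 ^ (k + 1)) :
    ∀ m : Nat, k ≤ m → gsssALoop f n (pvDown m) = gsssALoop f n (pvDown k) := by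
  intro m
  induction m with
  | zero => intro h; rw [Nat.le_zero.mp h]
  | succ p ih =>
    intro h
    rcases Nat.eq_or_lt_of_le h with he | hlt
    · rw [he]
    · have hp : k ≤ p := by omega
      rw [pvDown, gsssALoop]
      have htn : ((p : Int) + 1).toNat = p + 1 := by omega
      have hmag : n < 1000 ^ ((p : Int) + 1).toNat := by
        rw [htn]
        exact lt_of_lt_of_le hk (pow_le_pow_right₀ (by norm_num) (by omega))
      rw [if_pos hmag]
      exact ih hp

lemma loop_fire (f : Nat) (n : Int) (k : Nat) (hlow : (1000 : Int) ^ (k + 1) ≤ n) :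
    gsssALoop f n (pvDown (k + 1)) =
      (if PySem.Int.floordiv n (1000 ^ (k + 1)) = 1 then ""
       else gsssA f (PySem.Int.floordiv n (1000 ^ (k + 1)))) ++
      (PySem.List.pyGet? MultOnes ((k : Int) + 1)).getD "" ++
      (if PySem.Int.mod n (1000 ^ (k + 1)) > 0 then gsssA f (PySem.Int.mod n (1000 ^ (k + 1))) else "") := by
  rw [pvDown, gsssALoop]
  have htn : ((k : Int) + 1).toNat = k + 1 := by omega
  rw [htn, if_neg (not_lt.mpr hlow)]

-- digit-extraction arithmetic: pulling one base-1000 digit off a residue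
lemma emod_mul_ediv (n p : Int) (hp : 0 < p) : (n % (1000 * p)) / 1000 = (n / 1000) % p := by
  have hpos : (0:Int) < 1000 * p := by positivity
  have hr0 : 0 ≤ n % (1000 * p) := Int.emod_nonneg n (by omega)
  have hrlt : n % (1000 * p) < 1000 * p := Int.emod_lt_of_pos n hpos
  have hn : n = 1000 * p * (n / (1000 * p)) + n % (1000 * p) := (Int.mul_ediv_add_emod n (1000 * p)).symm
  have hdiv : n / 1000 = n % (1000 * p) / 1000 + p * (n / (1000 * p)) := by
    conv_lhs => rw [hn]
    rw [show 1000 * p * (n / (1000 * p)) + n % (1000 * p)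
          = n % (1000 * p) + 1000 * (p * (n / (1000 * p))) by ring]
    rw [Int.add_mul_ediv_left _ _ (by norm_num : (1000:Int) ≠ 0)]
  rw [hdiv, Int.add_mul_emod_self_left]
  exact (Int.emod_eq_of_lt (Int.ediv_nonneg hr0 (by norm_num))
    ((Int.ediv_lt_iff_lt_mul (by norm_num)).mpr (by linarith [hrlt]))).symm

-- splitting B's parts list at group k: the lower k groups are the parts of n % 1000^k
lemma pvParts_split (k : Nat) : ∀ (n j : Int), 0 ≤ n → n < 1000 ^ (k + 1) →
    pvParts n j = pvParts (n % 1000 ^ k) j ++ pvParts (n / 1000 ^ k) (j + (k : Int)) := by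
  induction k with
  | zero =>
    intro n j h0 _
    simp [pvParts_zero]
  | succ k ih =>
    intro n j h0 h1
    have hp : (0:Int) < 1000 ^ k := by positivity
    have hMp : (1000:Int) ^ (k + 1) = 1000 * 1000 ^ k := by ring
    have hr0 : 0 ≤ n % 1000 ^ (k + 1) := Int.emod_nonneg n (by positivity)
    have e1 : PySem.Int.mod n 1000 = n % 1000 := PySem.Int.mod_eq_emod_of_pos (by norm_num)
    have e2 : PySem.Int.floordiv n 1000 = n / 1000 := PySem.Int.floordiv_eq_ediv_of_pos (by norm_num)
    have e3 : PySem.Int.mod (n % 1000 ^ (k + 1)) 1000 = n % 1000 := by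
      rw [PySem.Int.mod_eq_emod_of_pos (by norm_num)]
      exact Int.emod_emod_of_dvd n (dvd_pow_self 1000 (Nat.succ_ne_zero k))
    have e4 : PySem.Int.floordiv (n % 1000 ^ (k + 1)) 1000 = (n / 1000) % 1000 ^ k := by
      rw [PySem.Int.floordiv_eq_ediv_of_pos (by norm_num), hMp]
      exact emod_mul_ediv n (1000 ^ k) hp
    have e5 : (n / 1000) / 1000 ^ k = n / 1000 ^ (k + 1) := by
      rw [hMp]
      exact Int.ediv_ediv_of_nonneg (by norm_num)
    have hd0 : 0 ≤ n / 1000 := Int.ediv_nonneg h0 (by norm_num)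
    have hdlt : n / 1000 < 1000 ^ (k + 1) := by
      rw [Int.ediv_lt_iff_lt_mul (by norm_num)]
      calc n < 1000 ^ (k + 2) := h1
      _ = 1000 ^ (k + 1) * 1000 := by ring
    rw [pvParts_unfold n j h0, pvParts_unfold (n % 1000 ^ (k + 1)) j hr0]
    rw [e1, e2, e3, e4, ih (n / 1000) (j + 1) hd0 hdlt, e5]
    rw [show j + 1 + (k : Int) = j + ((k + 1 : Nat) : Int) by push_cast; ring]
    simp [List.append_assoc]

-- A's small branch equals B's group renderer (digit extraction written two ways)
lemma A_small (f' : Nat) (n : Int) (h1 : 1 ≤ n) (h2 : n < 1000) :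
    gsssA (f' + 1) n = pvGroupName n := by
  rw [gsssA]
  rw [if_neg (by omega), if_pos h2]
  have htens : PySem.Int.floordiv (PySem.Int.mod n 100) 10 = PySem.Int.mod (PySem.Int.floordiv n 10) 10 := by
    rw [PySem.Int.mod_eq_emod_of_pos (by norm_num), PySem.Int.floordiv_eq_ediv_of_pos (by norm_num),
        PySem.Int.floordiv_eq_ediv_of_pos (by norm_num), PySem.Int.mod_eq_emod_of_pos (by norm_num)]
    omega
  unfold pvGroupName
  rw [htens]

-- the composite case 1000^(k+1) ≤ n < 1000^(k+2): A fires its loop at i = k+1,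
-- B's parts list splits into the top group and the parts of the remainder
lemma step_k (m : Nat)
    (ih : ∀ n : Int, n.toNat ≤ m → 0 ≤ n → n ≤ 2147483648 → ∀ f : Nat, n.toNat < f →
      gsssA f n = get_short_scale_suffix_alt n)
    (k : Nat) (hk : k + 1 ≤ 103) (n : Int) (hlow : (1000:Int) ^ (k + 1) ≤ n)
    (hhigh : n < 1000 ^ (k + 2)) (hm : n.toNat ≤ m + 1) (hb : n ≤ 2147483648)
    (f' : Nat) (hf : n.toNat < f' + 1) :
    gsssA (f' + 1) n = get_short_scale_suffix_alt n := by
  have hM : (0:Int) < 1000 ^ (k + 1) := by positivity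
  have h1000 : (1000:Int) ≤ n := le_trans (by exact_mod_cast pow_le_pow_right₀ (by norm_num) (by omega : 1 ≤ k + 1) |>.trans_eq' (by norm_num)) hlow
  rw [gsssA]
  rw [if_neg (by omega), if_neg (not_lt.mpr h1000)]
  rw [show (103:Int) = ((103:Nat):Int) by norm_num, pyRange_down]
  rw [loop_skip f' n (k + 1) hhigh 103 hk, loop_fire f' n k hlow]
  have hc : PySem.Int.floordiv n (1000 ^ (k + 1)) = n / 1000 ^ (k + 1) :=
    PySem.Int.floordiv_eq_ediv_of_pos hM
  have hrm : PySem.Int.mod n (1000 ^ (k + 1)) = n % 1000 ^ (k + 1) :=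
    PySem.Int.mod_eq_emod_of_pos hM
  rw [hc, hrm]
  set c := n / 1000 ^ (k + 1) with hcdef
  set r := n % 1000 ^ (k + 1) with hrdef
  have hc1 : 1 ≤ c := by
    rw [hcdef, Int.le_ediv_iff_mul_le hM]; linarith
  have hc999 : c < 1000 := by
    rw [hcdef, Int.ediv_lt_iff_lt_mul hM]
    calc n < 1000 ^ (k + 2) := hhigh
    _ = 1000 * 1000 ^ (k + 1) := by ring
  have hr0 : 0 ≤ r := Int.emod_nonneg n (by positivity)
  have hrlt : r < 1000 ^ (k + 1) := Int.emod_lt_of_pos n hM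
  have hrn : r < n := lt_of_lt_of_le hrlt hlow
  have hcn : c < n := lt_of_lt_of_le hc999 h1000
  have hB : get_short_scale_suffix_alt n =
      (if c = 1 then (PySem.List.pyGet? MultOnes ((k : Int) + 1)).getD ""
       else pvGroupName c ++ (PySem.List.pyGet? MultOnes ((k : Int) + 1)).getD "") ++
      get_short_scale_suffix_alt r := by
    unfold get_short_scale_suffix_alt
    rw [if_neg (by omega : ¬ n ≤ 0)]
    rw [pvParts_split (k + 1) n 0 (by omega) hhigh]
    rw [show (0:Int) + ((k + 1 : Nat) : Int) = (k : Int) + 1 by push_cast; ring]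
    rw [pvParts_top c ((k : Int) + 1) hc1 hc999 (by omega)]
    rw [List.reverse_append, List.reverse_singleton, List.singleton_append, strJoin_cons,
        alt_eq_join r hr0]
    rcases lt_or_eq_of_le hr0 with hrpos | hrz
    · rw [if_neg (by omega : ¬ r ≤ 0)]
    · rw [← hrz]
      simp [get_short_scale_suffix_alt]
  rw [hB]
  have hcalt : gsssA f' c = get_short_scale_suffix_alt c :=
    ih c (by omega) (by omega) (by omega) f' (by omega)
  have hralt : gsssA f' r = get_short_scale_suffix_alt r :=
    ih r (by omega) hr0 (by omega) f' (by omega)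
  by_cases hcone : c = 1
  · rw [if_pos hcone, if_pos hcone, String.empty_append]
    rcases lt_or_eq_of_le hr0 with hrpos | hrz
    · rw [if_pos hrpos, hralt]
    · rw [if_neg (by omega), ← hrz,
          show get_short_scale_suffix_alt 0 = "" from rfl]
  · have hcg : gsssA f' c = pvGroupName c := hcalt.trans (alt_small c hc1 hc999)
    rw [if_neg hcone, if_neg hcone, hcg]
    rcases lt_or_eq_of_le hr0 with hrpos | hrz
    · rw [if_pos hrpos, hralt]
    · rw [if_neg (by omega), ← hrz,
          show get_short_scale_suffix_alt 0 = "" from rfl]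

-- — main equivalence, by strong induction on the value —
lemma gsssA_eq_alt : ∀ (m : Nat) (n : Int), n.toNat ≤ m → 0 ≤ n → n ≤ 2147483648 →
    ∀ f : Nat, n.toNat < f → gsssA f n = get_short_scale_suffix_alt n := by
  intro m
  induction m with
  | zero =>
    intro n hm h0 _ f hf
    have hn : n = 0 := by omega
    subst hn
    obtain ⟨f', rfl⟩ : ∃ f', f = f' + 1 := ⟨f - 1, by omega⟩
    rw [gsssA]
    simp [get_short_scale_suffix_alt]
  | succ m ih =>
    intro n hm h0 hb f hf
    obtain ⟨f', rfl⟩ : ∃ f'', f = f'' + 1 := ⟨f - 1, by omega⟩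
    rcases eq_or_lt_of_le h0 with hz | hpos
    · subst hz
      rw [gsssA]
      simp [get_short_scale_suffix_alt]
    rcases lt_or_ge n 1000 with hsm | h1
    · rw [A_small f' n (by omega) hsm, alt_small n (by omega) hsm]
    rcases lt_or_ge n (1000 ^ 2) with h2 | h2'
    · exact step_k m ih 0 (by omega) n (by norm_num; omega) (by norm_num; omega) hm hb f' hf
    rcases lt_or_ge n (1000 ^ 3) with h3 | h3'
    · exact step_k m ih 1 (by omega) n (by norm_num; omega) (by norm_num; omega) hm hb f' hf
    · exact step_k m ih 2 (by omega) n (by norm_num; omega) (by norm_num; omega) hm hb f' hf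

-- ===== VERDICT (by name: the statement is the Claim_ definition above) =====
theorem get_short_scale_suffix_spec : Claim_equal_get_short_scale_suffix := by
  intro n hdom hpre
  unfold Spec_get_short_scale_suffix get_short_scale_suffix
  have hb : n ≤ 2147483648 := (of_decide_eq_true hdom).2
  exact gsssA_eq_alt n.toNat n le_rfl hpre hb (n.toNat + 1) (by omega)
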